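-- pv_equiv track=rewrite | github.com/oscarjbyles/flowcraft | backend/services/storage.py | _sanitize_flowchart_basename
-- ===== SOURCE A (Python) =====
-- def _sanitize_flowchart_basename(name: str) -> str:
--     """sanitize a flowchart base name (without .json) to safe characters.
--     comments: allow only alphanumeric, hyphen and underscore; convert spaces to underscores; lowercase.
--     """
--     try:
--         base = str(name or '').strip()
--         if base.endswith('.json'):
--             base = base[:-5]
--         # replace spaces then keep only allowed chars
--         base = base.replace(' ', '_').lower()
--         allowed = []
--         for ch in base:
--             if ch.isalnum() or ch in ('-', '_'):
--                 allowed.append(ch)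
--             else:
--                 allowed.append('_')
--         # collapse multiple underscores
--         sanitized = ''.join(allowed)
--         while '__' in sanitized:
--             sanitized = sanitized.replace('__', '_')
--         return sanitized.strip('_') or 'untitled'
--     except Exception:
--         return 'untitled'
-- ===== SOURCE B (Python) =====
-- import re
--
--
-- def _sanitize_flowchart_basename(name: str) -> str:
--     """sanitize a flowchart base name: tokenize on runs of disallowed
--     characters and join the tokens with single underscores."""
--     try:
--         base = str(name or '').strip()
--         if base.endswith('.json'):
--             base = base[:-5]
--         base = base.lower()
--         tokens = re.split(r'[^a-z0-9-]+', base)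
--         return '_'.join(t for t in tokens if t) or 'untitled'
--     except Exception:
--         return 'untitled'
-- ===== Notes on version B (the rewrite author's own statement) =====
-- stated objective: idiomatic
-- what changed: Replaces the per-character mapping loop plus the repeated replace('__','_') collapse loop and final strip('_') by a single re.split on runs of disallowed characters, joining the non-empty tokens with '_'.
import Mathlib
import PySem

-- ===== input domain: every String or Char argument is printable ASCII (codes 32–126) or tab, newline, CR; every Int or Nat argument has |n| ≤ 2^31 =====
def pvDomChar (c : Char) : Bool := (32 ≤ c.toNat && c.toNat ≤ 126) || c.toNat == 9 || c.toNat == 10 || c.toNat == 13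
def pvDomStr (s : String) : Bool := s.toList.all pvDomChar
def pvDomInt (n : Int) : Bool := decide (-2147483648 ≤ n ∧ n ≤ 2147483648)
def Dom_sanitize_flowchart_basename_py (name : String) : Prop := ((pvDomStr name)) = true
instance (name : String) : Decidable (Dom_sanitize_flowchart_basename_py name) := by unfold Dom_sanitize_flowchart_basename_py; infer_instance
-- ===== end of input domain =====

-- B replaces A's per-character mapping loop plus repeated replace('__','_') collapse loop and
-- final strip('_') by one tokenize-on-disallowed-runs pass joined with single underscores (idiomatic).


-- ===== PORT A =====
-- exact port of base.replace(' ', '_'): a one-char-for-one-char replace is a per-character map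
def pvSpaceToUnderscore (c : Char) : Char := if c == ' ' then '_' else c

-- exact port of `'__' in sanitized`: "__" occurs as a substring iff two adjacent underscores occur
def pvHasDD : List Char → Bool
  | c :: d :: t => (c == '_' && d == '_') || pvHasDD (d :: t)
  | _ => false

-- exact port of sanitized.replace('__', '_'): non-overlapping occurrences, scanned left to right
def pvRep : List Char → List Char
  | c :: d :: t => if c == '_' && d == '_' then '_' :: pvRep t else c :: pvRep (d :: t)
  | l => l

theorem pvRep_length_le (l : List Char) : (pvRep l).length ≤ l.length := by
  fun_induction pvRep l <;> simp_all <;> omega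

-- termination lemma for the `while '__' in sanitized` loop below
theorem pvRep_length_lt (l : List Char) (h : pvHasDD l = true) :
    (pvRep l).length < l.length := by
  fun_induction pvRep l with
  | case1 c d t hdd ih =>
    simp only [pvRep, hdd, if_true, List.length_cons]
    have := pvRep_length_le t; omega
  | case2 c d t hdd ih =>
    simp only [pvHasDD, hdd, Bool.false_or] at h
    simp only [pvRep, hdd, if_false, List.length_cons]
    exact Nat.succ_lt_succ (ih h)
  | case3 x hx =>
    exfalso
    cases x with
    | nil => simp [pvHasDD] at h
    | cons a t => cases t with
      | nil => simp [pvHasDD] at h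
      | cons b u => exact hx a b u rfl

-- exact port of `while '__' in sanitized: sanitized = sanitized.replace('__', '_')`
def pvCollapse (l : List Char) : List Char :=
  if h : pvHasDD l = true then pvCollapse (pvRep l) else l
  termination_by l.length
  decreasing_by exact pvRep_length_lt l h

def sanitize_flowchart_basename_py (name : String) : String :=
  -- base = str(name or '').strip()
  let base0 := PySem.Str.strip (if name == "" then "" else name)
  let l0 := base0.toList
  -- if base.endswith('.json'): base = base[:-5]
  let l1 := if PySem.Chars.endswith l0 ".json".toList then PySem.Chars.slice l0 none (some (-5)) else l0
  -- base = base.replace(' ', '_').lower()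
  let base := PySem.Chars.lower (l1.map pvSpaceToUnderscore)
  -- for ch in base: append ch if allowed else '_'
  let allowed := base.map (fun ch =>
    if PySem.Chars.isalnum ch || ch == '-' || ch == '_' then ch else '_')
  -- ''.join + the while-collapse loop
  let sanitized := pvCollapse allowed
  -- sanitized.strip('_') or 'untitled'
  let r := PySem.Chars.stripChars sanitized ['_']
  if r.isEmpty then "untitled" else String.ofList r

-- ===== PORT B =====
-- character class [a-z0-9-] of the regex
def pvGood (c : Char) : Bool := PySem.Chars.islower c || PySem.Chars.isdigit c || c == '-'

-- exact port of re.split(r'[^a-z0-9-]+', s): tokens are the maximal runs of [a-z0-9-];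
-- a leading/trailing separator run yields an empty first/last token
def pvResplit (l : List Char) : List (List Char) :=
  let tok := l.takeWhile pvGood
  let r := l.dropWhile pvGood
  if _h : r.isEmpty then [tok]
  else tok :: pvResplit (r.tail.dropWhile (fun c => !pvGood c))
  termination_by l.length
  decreasing_by
    have h1 : (List.dropWhile (fun c => !pvGood c) (List.dropWhile pvGood l).tail).length ≤ (List.dropWhile pvGood l).tail.length :=
      List.length_dropWhile_le _ _
    have h2 : (List.dropWhile pvGood l).length ≤ l.length := List.length_dropWhile_le _ _
    have h3 : (List.dropWhile pvGood l) ≠ [] := fun hnil => _h (by rw [show r = List.dropWhile pvGood l from rfl, hnil]; rfl)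
    have h4 : (List.dropWhile pvGood l).length ≠ 0 := by simpa [List.length_eq_zero_iff] using h3
    have h5 : (List.dropWhile pvGood l).tail.length = (List.dropWhile pvGood l).length - 1 := List.length_tail
    omega

-- exact port of '_'.join(...)
def pvJoinU : List (List Char) → List Char
  | [] => []
  | [t] => t
  | t :: ts => t ++ '_' :: pvJoinU ts

def sanitize_flowchart_basename_py_alt (name : String) : String :=
  -- base = str(name or '').strip()
  let base0 := PySem.Str.strip (if name == "" then "" else name)
  let l0 := base0.toList
  -- if base.endswith('.json'): base = base[:-5]
  let l1 := if PySem.Chars.endswith l0 ".json".toList then PySem.Chars.slice l0 none (some (-5)) else l0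
  -- base = base.lower()
  let base := PySem.Chars.lower l1
  -- tokens = re.split(r'[^a-z0-9-]+', base); '_'.join(t for t in tokens if t) or 'untitled'
  let joined := pvJoinU ((pvResplit base).filter (fun t => !t.isEmpty))
  if joined.isEmpty then "untitled" else String.ofList joined

-- ===== PRECONDITION & SPEC =====
def Spec_sanitize_flowchart_basename_py (name : String) (out : String) : Prop := out = sanitize_flowchart_basename_py_alt name
instance (name : String) (out : String) : Decidable (Spec_sanitize_flowchart_basename_py name out) := by unfold Spec_sanitize_flowchart_basename_py; infer_instance

-- ===== CLAIM (what is proved, stated in full; the proofs are below) =====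
def Claim_equal_sanitize_flowchart_basename_py : Prop := ∀ (name : String), Dom_sanitize_flowchart_basename_py name → Spec_sanitize_flowchart_basename_py name (sanitize_flowchart_basename_py name)

-- ===== LEMMAS AND PROOFS =====

def pvU (c : Char) : Bool := c == '_'
def pvSep (c : Char) : Bool := !pvGood c

-- proof-side helpers: one-pass collapse of underscore runs, and the per-run form of A's tail
def pvCr2 : List Char → List Char
  | [] => []
  | c :: t =>
    if c == '_' then '_' :: pvCr2 (t.dropWhile pvU) else c :: pvCr2 t
  termination_by l => l.length
  decreasing_by
    · have := List.length_dropWhile_le pvU t; simp; omega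
    · simp

def pvPre : List Char → List Char
  | [] => []
  | c :: t =>
    if pvGood c then c :: pvPre t else '_' :: pvPre (t.dropWhile pvSep)
  termination_by l => l.length
  decreasing_by
    · simp
    · have := List.length_dropWhile_le pvSep t; simp; omega

def pvF (c : Char) : Char := if pvGood c then c else '_'

theorem pvGood_beq_us (c : Char) (h : pvGood c = true) : (c == '_') = false := by
  rcases eq_or_ne c '_' with rfl | hne
  · exact absurd h (by decide)
  · simp [hne]

theorem pvHead_dropWhile_false {α : Type} (p : α → Bool) (l : List α) (g : α) (t : List α)
    (h : l.dropWhile p = g :: t) : p g = false := by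
  induction l with
  | nil => simp at h
  | cons a l' ih =>
    by_cases hp : p a = true
    · rw [List.dropWhile_cons, if_pos hp] at h; exact ih h
    · rw [List.dropWhile_cons, if_neg hp] at h
      cases h; simpa using hp

theorem pvCr2_cons_us (t : List Char) :
    pvCr2 ('_' :: t) = '_' :: pvCr2 (t.dropWhile pvU) := by
  rw [pvCr2]; simp

theorem pvCr2_cons_ne (c : Char) (t : List Char) (hc : (c == '_') = false) :
    pvCr2 (c :: t) = c :: pvCr2 t := by
  rw [pvCr2]; simp [hc]

-- step 1: the while-replace loop is the one-pass collapse
theorem pvCr2_rep (l : List Char) :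
    pvCr2 (pvRep l) = pvCr2 l ∧
      pvCr2 ((pvRep l).dropWhile pvU) = pvCr2 (l.dropWhile pvU) := by
  have key : ∀ n (l : List Char), l.length ≤ n →
      pvCr2 (pvRep l) = pvCr2 l ∧
        pvCr2 ((pvRep l).dropWhile pvU) = pvCr2 (l.dropWhile pvU) := by
    intro n
    induction n with
    | zero =>
      intro l hl
      have : l = [] := by cases l with | nil => rfl | cons a t => simp at hl
      subst this; exact ⟨rfl, rfl⟩
    | succ n ih =>
      intro l hl
      match l with
      | [] => exact ⟨rfl, rfl⟩
      | [c] => exact ⟨rfl, rfl⟩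
      | c :: d :: t =>
        have hlen_dt : (d :: t).length ≤ n := by simp at hl ⊢; omega
        have hlen_t : t.length ≤ n := by simp at hl ⊢; omega
        by_cases hcd : (c == '_' && d == '_') = true
        · have hc : c = '_' := by simp at hcd; exact hcd.1
          have hd : d = '_' := by simp at hcd; exact hcd.2
          subst hc; subst hd
          have hrep : pvRep ('_' :: '_' :: t) = '_' :: pvRep t := by simp [pvRep]
          constructor
          · rw [hrep, pvCr2_cons_us, pvCr2_cons_us]
            rw [List.dropWhile_cons, if_pos (by rfl : pvU '_' = true)]
            exact congrArg _ (ih t hlen_t).2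
          · rw [hrep, List.dropWhile_cons, if_pos (by rfl : pvU '_' = true),
              List.dropWhile_cons, if_pos (by rfl : pvU '_' = true),
              List.dropWhile_cons, if_pos (by rfl : pvU '_' = true)]
            exact (ih t hlen_t).2
        · have hrep : pvRep (c :: d :: t) = c :: pvRep (d :: t) := by
            rw [pvRep, if_neg (by simpa using hcd)]
          have p1 : pvCr2 (pvRep (c :: d :: t)) = pvCr2 (c :: d :: t) := by
            by_cases hc : (c == '_') = true
            · have hceq : c = '_' := by simpa using hc
              have hd : (d == '_') = false := by
                cases hd0 : (d == '_') with
                | false => rfl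
                | true => exact absurd (by simp [hc, hd0] : (c == '_' && d == '_') = true) hcd
              have hdropr : (pvRep (d :: t)).dropWhile pvU = pvRep (d :: t) := by
                cases t with
                | nil => simp [pvRep, List.dropWhile_cons, pvU, hd]
                | cons e t' =>
                  rw [pvRep]
                  rw [if_neg (by simp [hd] : ¬ (d == '_' && e == '_') = true)]
                  rw [List.dropWhile_cons, if_neg (by simp [pvU, hd])]
              rw [hrep, hceq, pvCr2_cons_us, pvCr2_cons_us, hdropr]
              rw [List.dropWhile_cons, if_neg (by simp [pvU, hd])]
              exact congrArg _ (ih (d :: t) hlen_dt).1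
            · have hc' : (c == '_') = false := by simpa using hc
              rw [hrep, pvCr2_cons_ne c _ hc', pvCr2_cons_ne c _ hc']
              exact congrArg _ (ih (d :: t) hlen_dt).1
          refine ⟨p1, ?_⟩
          by_cases hc : (c == '_') = true
          · have hceq : c = '_' := by simpa using hc
            have hd : (d == '_') = false := by
              cases hd0 : (d == '_') with
              | false => rfl
              | true => exact absurd (by simp [hc, hd0] : (c == '_' && d == '_') = true) hcd
            have hdropr : (pvRep (d :: t)).dropWhile pvU = pvRep (d :: t) := by
              cases t with
              | nil => simp [pvRep, List.dropWhile_cons, pvU, hd]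
              | cons e t' =>
                rw [pvRep]
                rw [if_neg (by simp [hd] : ¬ (d == '_' && e == '_') = true)]
                rw [List.dropWhile_cons, if_neg (by simp [pvU, hd])]
            rw [hrep, hceq, List.dropWhile_cons, if_pos (by rfl : pvU '_' = true),
              List.dropWhile_cons, if_pos (by rfl : pvU '_' = true), hdropr]
            rw [List.dropWhile_cons, if_neg (by simp [pvU, hd])]
            exact (ih (d :: t) hlen_dt).1
          · have hc' : (c == '_') = false := by simpa using hc
            rw [hrep, List.dropWhile_cons, if_neg (by simp [pvU, hc']),
              List.dropWhile_cons, if_neg (by simp [pvU, hc'])]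
            rw [← hrep]; exact p1
  exact key l.length l le_rfl

theorem pvCr2_of_not_hasDD (l : List Char) (h : pvHasDD l = false) : pvCr2 l = l := by
  have key : ∀ n (l : List Char), l.length ≤ n → pvHasDD l = false → pvCr2 l = l := by
    intro n
    induction n with
    | zero =>
      intro l hl _
      have : l = [] := by cases l with | nil => rfl | cons a t => simp at hl
      subst this; simp [pvCr2]
    | succ n ih =>
      intro l hl h
      match l with
      | [] => simp [pvCr2]
      | c :: t =>
        have hlen_t : t.length ≤ n := by simp at hl; omega
        by_cases hc : c = '_'
        · subst hc
          cases t with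
          | nil => rw [pvCr2_cons_us]; simp [pvCr2]
          | cons d t' =>
            rw [pvHasDD] at h
            simp at h
            have hd : (d == '_') = false := by simp [h.1]
            rw [pvCr2_cons_us, List.dropWhile_cons, if_neg (by simp [pvU, hd])]
            rw [ih (d :: t') hlen_t h.2]
        · have hc' : (c == '_') = false := by simp [hc]
          have ht : pvHasDD t = false := by
            cases t with
            | nil => rfl
            | cons d t' =>
              rw [pvHasDD] at h
              simp at h
              exact h.2
          rw [pvCr2_cons_ne c t hc', ih t hlen_t ht]
  exact key l.length l le_rfl h

theorem pvCollapse_eq_pvCr2 (l : List Char) : pvCollapse l = pvCr2 l := by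
  have key : ∀ n (l : List Char), l.length ≤ n → pvCollapse l = pvCr2 l := by
    intro n
    induction n with
    | zero =>
      intro l hl
      have : l = [] := by cases l with | nil => rfl | cons a t => simp at hl
      subst this; rw [pvCollapse]; simp [pvCr2, pvHasDD]
    | succ n ih =>
      intro l hl
      rw [pvCollapse]
      by_cases h : pvHasDD l = true
      · rw [dif_pos h]
        have hlt := pvRep_length_lt l h
        rw [ih (pvRep l) (by omega)]
        exact (pvCr2_rep l).1
      · rw [dif_neg h]
        exact (pvCr2_of_not_hasDD l (by simpa using h)).symm
  exact key l.length l le_rfl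

-- step 2: pointwise, A's allowed-char mapping after lowering agrees with keep-good-else-underscore
theorem pvLowerChar_not_upper (c : Char) :
    PySem.Chars.isupper (PySem.Chars.lowerChar c) = false := by
  rw [PySem.Chars.lowerChar]
  by_cases h : PySem.Chars.isupper c = true
  · rw [if_pos h]
    have h1 : 'A'.toNat ≤ c.toNat ∧ c.toNat ≤ 'Z'.toNat := by
      rw [PySem.Chars.isupper] at h
      simp at h
      exact ⟨h.1, h.2⟩
    have hval : (Char.ofNat (c.toNat + 32)).toNat = c.toNat + 32 := by
      rw [Char.toNat_ofNat]
      have : ('A'.toNat = 65 ∧ 'Z'.toNat = 90) := by decide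
      rw [if_pos]
      rw [Nat.isValidChar]
      left; omega
    rw [PySem.Chars.isupper]
    simp only [Bool.and_eq_false_iff, decide_eq_false_iff_not]
    right
    intro hle
    have : (Char.ofNat (c.toNat + 32)).toNat ≤ 'Z'.toNat := hle
    have hAZ : ('A'.toNat = 65 ∧ 'Z'.toNat = 90) := by decide
    omega
  · rw [if_neg h]; simpa using h

theorem pvMap_pointwise (c : Char) :
    (fun ch => if PySem.Chars.isalnum ch || ch == '-' || ch == '_' then ch else '_')
        (PySem.Chars.lowerChar (pvSpaceToUnderscore c))
      = pvF (PySem.Chars.lowerChar c) := by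
  by_cases hsp : c = ' '
  · subst hsp; decide
  · have hs : pvSpaceToUnderscore c = c := by simp [pvSpaceToUnderscore, hsp]
    rw [hs]
    have hnu := pvLowerChar_not_upper c
    generalize PySem.Chars.lowerChar c = d at hnu
    by_cases hd : d = '_'
    · subst hd; decide
    · have h1 : (d == '_') = false := by simp [hd]
      simp [pvF, pvGood, PySem.Chars.isalnum, PySem.Chars.isalpha, hnu, h1, Bool.or_assoc]

-- step 3: collapse of the mapped characters = per-run normal form
theorem pvF_beq_us (c : Char) : (pvF c == '_') = pvSep c := by
  by_cases h : pvGood c = true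
  · simp [pvF, pvSep, h, pvGood_beq_us c h]
  · simp [pvF, pvSep, h, Bool.eq_false_iff.mpr h]

theorem pvCr2_map_eq_pvPre (l : List Char) : pvCr2 (l.map pvF) = pvPre l := by
  have key : ∀ n (l : List Char), l.length ≤ n → pvCr2 (l.map pvF) = pvPre l := by
    intro n
    induction n with
    | zero =>
      intro l hl
      have : l = [] := by cases l with | nil => rfl | cons a t => simp at hl
      subst this; simp [pvCr2, pvPre]
    | succ n ih =>
      intro l hl
      match l with
      | [] => simp [pvCr2, pvPre]
      | c :: t =>
        have hlen_t : t.length ≤ n := by simp at hl; omega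
        by_cases hg : pvGood c = true
        · have hfc : pvF c = c := by simp [pvF, hg]
          rw [List.map_cons, hfc, pvCr2_cons_ne c _ (pvGood_beq_us c hg),
            ih t hlen_t, pvPre, if_pos hg]
        · have hfc : pvF c = '_' := by simp [pvF, hg]
          rw [List.map_cons, hfc, pvCr2_cons_us]
          have hdm : (t.map pvF).dropWhile pvU = (t.dropWhile pvSep).map pvF := by
            rw [List.dropWhile_map]
            rw [show (pvU ∘ pvF) = pvSep from funext (fun x => pvF_beq_us x)]
          rw [hdm, ih (t.dropWhile pvSep) (le_trans (List.length_dropWhile_le _ _) hlen_t),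
            pvPre, if_neg hg]
  exact key l.length l le_rfl

-- step 4: stripping underscores from the normal form = join of the non-empty tokens
theorem pvDropWhile_eq_self_of_all {α : Type} (p : α → Bool) (l : List α)
    (h : ∀ c ∈ l, p c = false) : l.dropWhile p = l := by
  cases l with
  | nil => rfl
  | cons a t => rw [List.dropWhile_cons, if_neg (by simp [h a (by simp)])]

theorem pvRdrop_append_allgood (R x : List Char) (h : ∀ c ∈ R, pvU c = false) :
    List.rdropWhile pvU (R ++ x) = R ++ List.rdropWhile pvU x := by
  rw [List.rdropWhile, List.rdropWhile, List.reverse_append, List.dropWhile_append]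
  by_cases he : (x.reverse.dropWhile pvU).isEmpty = true
  · rw [if_pos he]
    have hx : x.reverse.dropWhile pvU = [] := by simpa [List.isEmpty_iff] using he
    rw [hx, pvDropWhile_eq_self_of_all pvU R.reverse (fun c hc => h c (by simpa using hc))]
    simp
  · rw [if_neg he]
    simp

theorem pvJoinU_ne_nil (t : List Char) (ts : List (List Char)) (ht : t ≠ []) :
    pvJoinU (t :: ts) ≠ [] := by
  cases ts with
  | nil => simpa [pvJoinU] using ht
  | cons t' ts' => simp [pvJoinU]

theorem pvPre_good_append (R t : List Char) (h : ∀ c ∈ R, pvGood c = true) :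
    pvPre (R ++ t) = R ++ pvPre t := by
  induction R with
  | nil => simp
  | cons a R' ih =>
    rw [List.cons_append, pvPre, if_pos (h a (by simp))]
    rw [ih (fun c hc => h c (by simp [hc]))]
    simp

theorem pvDropU_pvPre_dropSep (x : List Char) :
    List.dropWhile pvU (pvPre (x.dropWhile pvSep)) = pvPre (x.dropWhile pvSep) := by
  cases e : x.dropWhile pvSep with
  | nil => simp [pvPre]
  | cons g t =>
    have hg : pvSep g = false := pvHead_dropWhile_false pvSep x g t e
    have hgood : pvGood g = true := by simpa [pvSep] using hg
    rw [pvPre, if_pos hgood, List.dropWhile_cons,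
      if_neg (by simp [pvU, pvGood_beq_us g hgood])]

theorem pvRdrop_cons (p : Char → Bool) (a : Char) (x : List Char) :
    List.rdropWhile p (a :: x) =
      if List.rdropWhile p x = [] then (if p a = true then [] else [a])
      else a :: List.rdropWhile p x := by
  rw [List.rdropWhile, List.rdropWhile]
  rw [show (a :: x).reverse = x.reverse ++ [a] by simp]
  rw [List.dropWhile_append]
  by_cases he : (x.reverse.dropWhile p).isEmpty = true
  · rw [if_pos he]
    have hx : x.reverse.dropWhile p = [] := by simpa [List.isEmpty_iff] using he
    rw [if_pos (by simp [hx])]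
    by_cases hp : p a = true
    · simp [List.dropWhile_cons, hp]
    · simp [List.dropWhile_cons, hp]
  · rw [if_neg he]
    have hx : x.reverse.dropWhile p ≠ [] := by simpa [List.isEmpty_iff] using he
    rw [if_neg (by simpa using hx)]
    simp

theorem pvStrip_pre_eq_join (l : List Char) :
    List.rdropWhile pvU (List.dropWhile pvU (pvPre l))
      = pvJoinU ((pvResplit l).filter (fun t => !t.isEmpty)) := by
  have hfun : (fun c : Char => !pvGood c) = pvSep := rfl
  have key : ∀ n (l : List Char), l.length ≤ n →
      List.rdropWhile pvU (List.dropWhile pvU (pvPre l))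
        = pvJoinU ((pvResplit l).filter (fun t => !t.isEmpty)) := by
    intro n
    induction n with
    | zero =>
      intro l hl
      have : l = [] := by cases l with | nil => rfl | cons a t => simp at hl
      subst this
      rw [pvResplit]
      simp [pvPre, pvJoinU, List.rdropWhile]
    | succ n ih =>
      intro l hl
      match l with
      | [] =>
        rw [pvResplit]
        simp [pvPre, pvJoinU, List.rdropWhile]
      | c :: t =>
        by_cases hg : pvGood c = true
        · -- good head: peel off the maximal good run
          have htw : (c :: t).takeWhile pvGood = c :: t.takeWhile pvGood := by
            rw [List.takeWhile_cons, if_pos hg]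
          have hdw : (c :: t).dropWhile pvGood = t.dropWhile pvGood := by
            rw [List.dropWhile_cons, if_pos hg]
          have hRgood : ∀ x ∈ (c :: t).takeWhile pvGood, pvGood x = true :=
            fun x hx => List.mem_takeWhile_imp hx
          have hRus : ∀ x ∈ (c :: t).takeWhile pvGood, pvU x = false :=
            fun x hx => by simp [pvU, pvGood_beq_us x (hRgood x hx)]
          have hpre : pvPre (c :: t)
              = (c :: t).takeWhile pvGood ++ pvPre ((c :: t).dropWhile pvGood) := by
            conv_lhs => rw [← List.takeWhile_append_dropWhile (p := pvGood) (l := c :: t)]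
            exact pvPre_good_append _ _ hRgood
          have hdropU : List.dropWhile pvU
                ((c :: t).takeWhile pvGood ++ pvPre ((c :: t).dropWhile pvGood))
              = (c :: t).takeWhile pvGood ++ pvPre ((c :: t).dropWhile pvGood) := by
            rw [htw, List.cons_append, List.dropWhile_cons,
              if_neg (by simp [pvU, pvGood_beq_us c hg])]
          rw [hpre, hdropU, pvRdrop_append_allgood _ _ hRus]
          rw [pvResplit]
          simp only [hdw, htw]
          cases er : t.dropWhile pvGood with
          | nil =>
            simp [pvPre, pvJoinU, List.rdropWhile_nil]
          | cons s t₂ =>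
            have hs : pvGood s = false := pvHead_dropWhile_false pvGood t s t₂ er
            rw [dif_neg (by simp)]
            simp only [List.tail_cons, hfun]
            rw [List.filter_cons, if_pos (by simp)]
            rw [pvPre, if_neg (by simp [hs])]
            rw [pvRdrop_cons pvU '_' (pvPre (t₂.dropWhile pvSep))]
            have hlen₂ : (t₂.dropWhile pvSep).length ≤ n := by
              have h1 := List.length_dropWhile_le pvSep t₂
              have h2 := List.length_dropWhile_le pvGood t
              rw [er] at h2
              simp at hl h2
              omega
            have hJ := ih (t₂.dropWhile pvSep) hlen₂
            rw [pvDropU_pvPre_dropSep t₂] at hJ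
            rw [hJ]
            cases hTF : (pvResplit (t₂.dropWhile pvSep)).filter (fun t => !t.isEmpty) with
            | nil => simp [pvJoinU, pvU]
            | cons u us =>
              have hu : u ≠ [] := by
                have hmem : u ∈ (pvResplit (t₂.dropWhile pvSep)).filter (fun t => !t.isEmpty) := by
                  rw [hTF]; exact List.mem_cons_self
                have := List.of_mem_filter hmem
                simpa [List.isEmpty_iff] using this
              rw [if_neg (pvJoinU_ne_nil u us hu)]
              simp [pvJoinU]
        · -- separator head: it is stripped / split away on both sides
          have htw : (c :: t).takeWhile pvGood = [] := by
            rw [List.takeWhile_cons, if_neg (by simp [hg])]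
          have hdw : (c :: t).dropWhile pvGood = c :: t := by
            rw [List.dropWhile_cons, if_neg (by simp [hg])]
          have hlen : (t.dropWhile pvSep).length ≤ n := by
            have := List.length_dropWhile_le pvSep t
            simp at hl; omega
          rw [pvResplit]
          simp only [htw, hdw]
          rw [dif_neg (by simp)]
          simp only [List.tail_cons, hfun]
          rw [List.filter_cons, if_neg (by simp)]
          rw [pvPre, if_neg hg]
          rw [List.dropWhile_cons, if_pos (by rfl : pvU '_' = true)]
          exact ih (t.dropWhile pvSep) hlen
  exact key l.length l le_rfl

theorem pvStripChars_underscore (s : List Char) :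
    PySem.Chars.stripChars s ['_'] = List.rdropWhile pvU (List.dropWhile pvU s) := by
  rw [PySem.Chars.stripChars, List.rdropWhile]
  have hp : (fun c => (['_'] : List Char).contains c) = pvU := by
    funext c
    by_cases h : c = '_' <;> simp [pvU, h]
  rw [hp]

theorem pvMap_lower (L : List Char) :
    (PySem.Chars.lower (L.map pvSpaceToUnderscore)).map
        (fun ch => if PySem.Chars.isalnum ch || ch == '-' || ch == '_' then ch else '_')
      = (PySem.Chars.lower L).map pvF := by
  simp only [PySem.Chars.lower, List.map_map]
  refine List.map_congr_left (fun a _ => ?_)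
  simpa [Function.comp] using pvMap_pointwise a

-- ===== VERDICT (by name: the statement is the Claim_ definition above) =====
theorem sanitize_flowchart_basename_py_spec : Claim_equal_sanitize_flowchart_basename_py := by
  intro name _
  show sanitize_flowchart_basename_py name = sanitize_flowchart_basename_py_alt name
  unfold sanitize_flowchart_basename_py sanitize_flowchart_basename_py_alt
  simp only []
  rw [pvMap_lower, pvCollapse_eq_pvCr2, pvCr2_map_eq_pvPre, pvStripChars_underscore,
    pvStrip_pre_eq_join]
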